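-- pv_equiv track=rewrite | github.com/LibCity/Bigscity-LibCity-Datasets | nyc_taxi_grid.py | get_data_url
-- ===== SOURCE A (Python) =====
-- def get_data_url(input_dir_flow, start_year, start_month, end_year, end_month):
--     pattern = input_dir_flow + "/green_tripdata_%d-%02d.csv"
--
--     data_url = []
--
--     i = start_year
--     while i <= end_year:
--         j = start_month if i == start_year else 1
--         end_j = end_month if i == end_year else 12
--
--         while j <= end_j:
--             data_url.append(pattern % (i, j))
--             j += 1
--
--         i += 1
--
--     return data_url
-- ===== SOURCE B (Python) =====
-- def get_data_url(input_dir_flow, start_year, start_month, end_year, end_month):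
--     def url(y, m):
--         return f"{input_dir_flow}/green_tripdata_{y}-{m:02d}.csv"
--     if start_year > end_year:
--         return []
--     if start_year == end_year:
--         return [url(start_year, m) for m in range(start_month, end_month + 1)]
--     data_url = [url(start_year, m) for m in range(start_month, 13)]
--     for code in range((start_year + 1) * 12, end_year * 12):
--         y, m = divmod(code, 12)
--         data_url.append(url(y, m + 1))
--     data_url += [url(end_year, m) for m in range(1, end_month + 1)]
--     return data_url
-- ===== Notes on version B (the rewrite author's own statement) =====
-- stated objective: alternative
-- what changed: Replace A's nested guarded while-loops by three segments: the first and last partial years as direct month-range comprehensions and all full middle years as one flat loop over an integer month code (year*12+month-1) decoded with divmod; URLs are built with f-strings instead of %-formatting.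
-- outside the precondition, e.g. on get_data_url('d%s', 2020, 1, 2020, 1): A raises TypeError, B returns ['d%s/green_tripdata_2020-01.csv']
import Mathlib
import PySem

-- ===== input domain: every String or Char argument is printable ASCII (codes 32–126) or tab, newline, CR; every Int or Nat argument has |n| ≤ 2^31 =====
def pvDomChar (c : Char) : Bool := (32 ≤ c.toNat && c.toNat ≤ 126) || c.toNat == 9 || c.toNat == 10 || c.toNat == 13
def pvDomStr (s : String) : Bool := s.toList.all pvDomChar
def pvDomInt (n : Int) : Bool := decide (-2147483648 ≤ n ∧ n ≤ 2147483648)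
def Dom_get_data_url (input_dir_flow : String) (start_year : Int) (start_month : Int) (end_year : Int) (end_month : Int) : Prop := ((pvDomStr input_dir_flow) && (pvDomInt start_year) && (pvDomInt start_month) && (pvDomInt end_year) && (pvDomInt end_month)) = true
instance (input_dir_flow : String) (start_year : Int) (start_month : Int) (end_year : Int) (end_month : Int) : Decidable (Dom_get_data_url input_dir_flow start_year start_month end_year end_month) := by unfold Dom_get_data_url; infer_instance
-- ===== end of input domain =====

-- ===== PORT A =====
-- B replaces A's nested guarded while-loops by three segments (first partial year,
-- flat divmod loop over the full middle years, last partial year). Objective: alternative.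
-- Under Pre_ (no '%' in input_dir_flow) both Pythons' formatting is the plain
-- concatenation pvFmt; exact there.

-- '%02d' / f"{m:02d}" applied to an integer (identical in both Pythons)
def pvPad2 (n : Int) : String :=
  let s := PySem.Int.toStr n
  if s.length = 1 then "0" ++ s else s

def pvFmt (input_dir_flow : String) (i : Int) (j : Int) : String :=
  input_dir_flow ++ "/green_tripdata_" ++ PySem.Int.toStr i ++ "-" ++ pvPad2 j ++ ".csv"

-- inner 'while j <= end_j' loop of A
def pvMonthsA (input_dir_flow : String) (i : Int) (j : Int) (end_j : Int) : List String :=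
  if j ≤ end_j then pvFmt input_dir_flow i j :: pvMonthsA input_dir_flow i (j + 1) end_j
  else []
termination_by (end_j + 1 - j).toNat
decreasing_by omega

-- outer 'while i <= end_year' loop of A
def pvYearsA (input_dir_flow : String) (start_year : Int) (start_month : Int)
    (end_year : Int) (end_month : Int) (i : Int) : List String :=
  if i ≤ end_year then
    let j := if i == start_year then start_month else 1
    let end_j := if i == end_year then end_month else 12
    pvMonthsA input_dir_flow i j end_j ++
      pvYearsA input_dir_flow start_year start_month end_year end_month (i + 1)
  else []
termination_by (end_year + 1 - i).toNat
decreasing_by omega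

def get_data_url (input_dir_flow : String) (start_year : Int) (start_month : Int) (end_year : Int) (end_month : Int) : List String :=
  pvYearsA input_dir_flow start_year start_month end_year end_month start_year

-- ===== PORT B =====
-- '[url(y, m) for m in range(a, b)]' in B
def pvMonthsB (input_dir_flow : String) (y : Int) (a : Int) (b : Int) : List String :=
  (PySem.List.pyRange a b 1).map (fun m => pvFmt input_dir_flow y m)

def get_data_url_alt (input_dir_flow : String) (start_year : Int) (start_month : Int) (end_year : Int) (end_month : Int) : List String :=
  if start_year > end_year then []
  else if start_year == end_year then
    pvMonthsB input_dir_flow start_year start_month (end_month + 1)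
  else
    pvMonthsB input_dir_flow start_year start_month 13 ++
      (PySem.List.pyRange ((start_year + 1) * 12) (end_year * 12) 1).map (fun code =>
        let y := PySem.Int.floordiv code 12
        let m := PySem.Int.mod code 12
        pvFmt input_dir_flow y (m + 1)) ++
      pvMonthsB input_dir_flow end_year 1 (end_month + 1)

-- ===== PRECONDITION & SPEC =====
-- Pre_ excludes input_dir_flow containing '%' when at least one URL is emitted: Python
-- %-formatting then reinterprets the directory string (raising TypeError/ValueError on
-- almost all such strings and collapsing '%%' to '%' on the rest), while B uses
-- f-strings and both ports model the pattern as plain concatenation; with an empty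
-- year/month range the pattern is never formatted and both return [].
def Pre_get_data_url (input_dir_flow : String) (start_year : Int) (start_month : Int) (end_year : Int) (end_month : Int) : Prop :=
  '%' ∉ input_dir_flow.toList ∨ end_year < start_year ∨
    (start_year = end_year ∧ end_month < start_month)
instance (input_dir_flow : String) (start_year : Int) (start_month : Int) (end_year : Int) (end_month : Int) : Decidable (Pre_get_data_url input_dir_flow start_year start_month end_year end_month) := by unfold Pre_get_data_url; infer_instance

def pvWitness_get_data_url : String × Int × Int × Int × Int := ("input/nyc", 2015, 7, 2016, 2)

def Spec_get_data_url (input_dir_flow : String) (start_year : Int) (start_month : Int) (end_year : Int) (end_month : Int) (out : List String) : Prop := out = get_data_url_alt input_dir_flow start_year start_month end_year end_month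
instance (input_dir_flow : String) (start_year : Int) (start_month : Int) (end_year : Int) (end_month : Int) (out : List String) : Decidable (Spec_get_data_url input_dir_flow start_year start_month end_year end_month out) := by unfold Spec_get_data_url; infer_instance

-- ===== CLAIM (what is proved, stated in full; the proofs are below) =====
def Claim_equal_get_data_url : Prop := ∀ (input_dir_flow : String) (start_year : Int) (start_month : Int) (end_year : Int) (end_month : Int), Dom_get_data_url input_dir_flow start_year start_month end_year end_month → Pre_get_data_url input_dir_flow start_year start_month end_year end_month → Spec_get_data_url input_dir_flow start_year start_month end_year end_month (get_data_url input_dir_flow start_year start_month end_year end_month)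

-- ===== LEMMAS AND PROOFS =====

-- B's middle segment as a function of its code-range endpoints
def pvFlat (input_dir_flow : String) (a : Int) (b : Int) : List String :=
  (PySem.List.pyRange a b 1).map (fun code =>
    pvFmt input_dir_flow (PySem.Int.floordiv code 12) (PySem.Int.mod code 12 + 1))

lemma pvFlat_empty (input_dir_flow : String) {a b : Int} (h : b ≤ a) :
    pvFlat input_dir_flow a b = [] := by
  simp [pvFlat, PySem.List.pyRange_one_eq_nil h]

lemma pvFlat_append (input_dir_flow : String) {a m b : Int} (h1 : a ≤ m) (h2 : m ≤ b) :
    pvFlat input_dir_flow a b = pvFlat input_dir_flow a m ++ pvFlat input_dir_flow m b := by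
  simp [pvFlat, PySem.List.pyRange_one_append a m b h1 h2]

-- A's inner month loop is B's month-range comprehension
lemma pvMonthsA_eq_monthsB (input_dir_flow : String) (y : Int) (j end_j : Int) :
    pvMonthsA input_dir_flow y j end_j = pvMonthsB input_dir_flow y j (end_j + 1) := by
  by_cases h : j ≤ end_j
  · rw [pvMonthsA, if_pos h, pvMonthsB, PySem.List.pyRange_one_cons (by omega), List.map_cons,
      pvMonthsA_eq_monthsB input_dir_flow y (j + 1) end_j, pvMonthsB]
  · rw [pvMonthsA, if_neg h, pvMonthsB, PySem.List.pyRange_one_eq_nil (by omega), List.map_nil]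
termination_by (end_j + 1 - j).toNat
decreasing_by omega

-- a full year of A equals the corresponding slice of the flat code range
lemma pvMonthsA_full_eq_flat (input_dir_flow : String) (y : Int) :
    pvMonthsA input_dir_flow y 1 12 = pvFlat input_dir_flow (y * 12) (y * 12 + 12) := by
  have aux : ∀ (k : Nat) (j : Int), 1 ≤ j → j ≤ 13 → k = (13 - j).toNat →
      pvMonthsA input_dir_flow y j 12 =
        pvFlat input_dir_flow (y * 12 + (j - 1)) (y * 12 + 12) := by
    intro k
    induction k with
    | zero =>
      intro j _ _ hk
      rw [pvMonthsA, if_neg (by omega), pvFlat_empty input_dir_flow (by omega)]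
    | succ n ih =>
      intro j hj1 hj2 hk
      rw [pvMonthsA, if_pos (by omega), pvFlat, PySem.List.pyRange_one_cons (by omega),
        List.map_cons]
      have hdiv : PySem.Int.floordiv (y * 12 + (j - 1)) 12 = y := by
        rw [PySem.Int.floordiv_eq_iff_of_pos (by omega)]; constructor <;> omega
      have hmod : PySem.Int.mod (y * 12 + (j - 1)) 12 = j - 1 := by
        have hfm := PySem.Int.floordiv_mul_add_mod (y * 12 + (j - 1)) 12
        rw [hdiv] at hfm; omega
      rw [hdiv, hmod, show j - 1 + 1 = j from by ring,
        ih (j + 1) (by omega) (by omega) (by omega),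
        show y * 12 + (j + 1 - 1) = y * 12 + (j - 1) + 1 from by ring, pvFlat]
  have h12 := aux 12 1 (by omega) (by omega) (by omega)
  rw [show y * 12 + (1 - 1) = y * 12 from by ring] at h12
  exact h12

-- A's tail from a non-first year i: full years i..ey-1 flat, then the last partial year
lemma pvYearsA_tail (input_dir_flow : String) (sy sm ey em : Int) :
    ∀ i, sy < i → i ≤ ey →
      pvYearsA input_dir_flow sy sm ey em i =
        pvFlat input_dir_flow (i * 12) (ey * 12) ++ pvMonthsB input_dir_flow ey 1 (em + 1) := by
  intro i hi h
  rw [pvYearsA, if_pos h]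
  simp only [beq_iff_eq]
  by_cases hey : i = ey
  · subst hey
    rw [show pvYearsA input_dir_flow sy sm i em (i + 1) = [] from by
          rw [pvYearsA, if_neg (by omega)],
        List.append_nil, if_neg (by omega), if_pos rfl,
        pvMonthsA_eq_monthsB, pvFlat_empty input_dir_flow le_rfl, List.nil_append]
  · have hrec := pvYearsA_tail input_dir_flow sy sm ey em (i + 1) (by omega) (by omega)
    rw [if_neg (by omega), if_neg hey, hrec, pvMonthsA_full_eq_flat, ← List.append_assoc,
      show (i + 1) * 12 = i * 12 + 12 from by ring,
      ← pvFlat_append input_dir_flow (by omega) (by omega)]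
termination_by i => (ey + 1 - i).toNat
decreasing_by omega

-- ===== VERDICT (by name: the statement is the Claim_ definition above) =====
theorem get_data_url_spec : Claim_equal_get_data_url := by
  intro idf sy sm ey em _hdom _hpre
  show get_data_url idf sy sm ey em = get_data_url_alt idf sy sm ey em
  rw [get_data_url, get_data_url_alt]
  by_cases h1 : sy > ey
  · rw [if_pos h1, pvYearsA, if_neg (by omega)]
  · rw [if_neg h1]
    simp only [beq_iff_eq]
    by_cases h2 : sy = ey
    · subst h2
      rw [if_pos rfl, pvYearsA, if_pos le_rfl]
      simp only [beq_self_eq_true, if_true]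
      rw [show pvYearsA idf sy sm sy em (sy + 1) = [] from by rw [pvYearsA, if_neg (by omega)],
        List.append_nil, pvMonthsA_eq_monthsB]
    · rw [if_neg h2, pvYearsA, if_pos (by omega)]
      simp only [beq_self_eq_true, if_true, beq_iff_eq]
      rw [if_neg h2, pvYearsA_tail idf sy sm ey em (sy + 1) (by omega) (by omega),
        pvMonthsA_eq_monthsB, ← List.append_assoc]
      rfl
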